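-- pv_equiv track=rewrite | github.com/hxxxer/CheckupAI | backend/ocr/utils.py | table_html_clean
-- ===== SOURCE A (Python) =====
-- def table_html_clean(table_html: str) -> str:
--     """
--     清洗 HTML 中的转义字符，将其转换为正常字符
--
--     Args:
--         table_html: 原始 HTML 字符串
--
--     Returns:
--         清洗后的 HTML 字符串
--     """
--     if not table_html:
--         return table_html
--
--     # 定义转义字符映射表
--     escape_map = {
--         r'\uparrow ': '↑ ',      # 上箭头
--         r'\downarrow ': '↓ ',    # 下箭头
--         r'\times ': ' × ',        # 乘号
--         r'\mu ': 'μ',           # 删除\m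
--     }
--
--     # 逐个替换转义字符
--     cleaned_html = table_html
--     for escape_seq, normal_char in escape_map.items():
--         cleaned_html = cleaned_html.replace(escape_seq, normal_char)
--
--     return cleaned_html
-- ===== SOURCE B (Python) =====
-- def table_html_clean(table_html: str) -> str:
--     """Single-pass scanner with a dispatch on the backslash for the three
--     arrow/times escapes, then one more pass for the mu escape (A replaces that
--     key last, so the times replacement's leading space can create new matches
--     for it that must still be replaced)."""
--     if not table_html:
--         return table_html
--
--     out = []
--     i, n = 0, len(table_html)
--     while i < n:
--         c = table_html[i]
--         if c == '\\':
--             if table_html.startswith('\\uparrow ', i):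
--                 out.append('↑ '); i += 9; continue
--             if table_html.startswith('\\downarrow ', i):
--                 out.append('↓ '); i += 11; continue
--             if table_html.startswith('\\times ', i):
--                 out.append(' × '); i += 7; continue
--         out.append(c)
--         i += 1
--     s = ''.join(out)
--
--     res = []
--     i, n = 0, len(s)
--     while i < n:
--         if s[i] == '\\' and s.startswith('\\mu ', i):
--             res.append('μ'); i += 4
--         else:
--             res.append(s[i]); i += 1
--     return ''.join(res)
-- ===== Notes on version B (the rewrite author's own statement) =====
-- stated objective: alternative
-- what changed: A runs four sequential str.replace scans; B is a hand-written single left-to-right scan with a dispatch on the backslash for the three arrow/times escapes, followed by one more scan for the mu escape (kept separate because the times replacement inserts a leading space that can complete a new mu-escape occurrence, which A, replacing that key last, also picks up).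
import Mathlib
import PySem

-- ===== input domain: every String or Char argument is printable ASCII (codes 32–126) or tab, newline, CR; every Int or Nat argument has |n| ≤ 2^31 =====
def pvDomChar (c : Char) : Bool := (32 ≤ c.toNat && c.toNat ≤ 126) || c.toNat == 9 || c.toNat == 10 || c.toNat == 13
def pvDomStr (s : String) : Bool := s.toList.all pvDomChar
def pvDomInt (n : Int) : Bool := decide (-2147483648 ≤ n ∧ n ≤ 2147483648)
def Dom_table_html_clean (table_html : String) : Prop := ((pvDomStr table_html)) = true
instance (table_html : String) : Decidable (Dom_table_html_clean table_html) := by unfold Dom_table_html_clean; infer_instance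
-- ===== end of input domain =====

-- B replaces A's four sequential str.replace scans by one table-driven scan plus one second scan for the mu escape; same return value, no speed claim.

-- ===== PORT A =====
def table_html_clean (table_html : String) : String :=
  if table_html = "" then table_html
  else
    let c1 := PySem.Str.replace table_html "\\uparrow " "↑ "
    let c2 := PySem.Str.replace c1 "\\downarrow " "↓ "
    let c3 := PySem.Str.replace c2 "\\times " " × "
    PySem.Str.replace c3 "\\mu " "μ"

-- ===== PORT B =====
-- first pass of Source B: one scan dispatching on '\\' among the three arrow/times keys
def pvScan3 : List Char → List Char
  | [] => []
  | c :: cs =>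
    if c = '\\' then
      if ['\\','u','p','a','r','r','o','w',' '].isPrefixOf (c :: cs) then
        '↑' :: ' ' :: pvScan3 (List.drop 9 (c :: cs))
      else if ['\\','d','o','w','n','a','r','r','o','w',' '].isPrefixOf (c :: cs) then
        '↓' :: ' ' :: pvScan3 (List.drop 11 (c :: cs))
      else if ['\\','t','i','m','e','s',' '].isPrefixOf (c :: cs) then
        ' ' :: '×' :: ' ' :: pvScan3 (List.drop 7 (c :: cs))
      else c :: pvScan3 cs
    else c :: pvScan3 cs
  termination_by s => s.length
  decreasing_by all_goals simp [List.length_drop]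

-- second pass of Source B: one scan replacing '\mu ' by 'μ'
def pvScanMu : List Char → List Char
  | [] => []
  | c :: cs =>
    if c = '\\' ∧ ['\\','m','u',' '].isPrefixOf (c :: cs) then
      'μ' :: pvScanMu (List.drop 4 (c :: cs))
    else c :: pvScanMu cs
  termination_by s => s.length
  decreasing_by all_goals simp [List.length_drop]

def table_html_clean_alt (table_html : String) : String :=
  if table_html = "" then table_html
  else String.ofList (pvScanMu (pvScan3 table_html.toList))

-- ===== PRECONDITION & SPEC =====
def Spec_table_html_clean (table_html : String) (out : String) : Prop := out = table_html_clean_alt table_html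
instance (table_html : String) (out : String) : Decidable (Spec_table_html_clean table_html out) := by unfold Spec_table_html_clean; infer_instance

-- ===== CLAIM (what is proved, stated in full; the proofs are below) =====
def Claim_equal_table_html_clean : Prop := ∀ (table_html : String), Dom_table_html_clean table_html → Spec_table_html_clean table_html (table_html_clean table_html)



-- ===== LEMMAS AND PROOFS =====
set_option maxRecDepth 10000

-- structured model of Python str.replace with a nonempty pattern
def pvRepl (k v : List Char) : List Char → List Char
  | [] => []
  | c :: cs =>
    if k.isPrefixOf (c :: cs) then v ++ pvRepl k v (List.drop (k.length - 1) cs)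
    else c :: pvRepl k v cs
  termination_by s => s.length
  decreasing_by all_goals simp [List.length_drop]

theorem pvRepl_nil (k v : List Char) : pvRepl k v [] = [] := by
  rw [pvRepl.eq_def]

theorem pvRepl_pos (k v : List Char) (c : Char) (cs : List Char)
    (h : k.isPrefixOf (c :: cs) = true) :
    pvRepl k v (c :: cs) = v ++ pvRepl k v (List.drop (k.length - 1) cs) := by
  rw [pvRepl.eq_def]
  simp [h]

theorem pvRepl_neg (k v : List Char) (c : Char) (cs : List Char)
    (h : ¬ k <+: (c :: cs)) : pvRepl k v (c :: cs) = c :: pvRepl k v cs := by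
  rw [pvRepl.eq_def]
  simp [List.isPrefixOf_iff_prefix, h]

theorem pvNotPrefixHead (a c : Char) (k l : List Char) (h : a ≠ c) :
    ¬ (a :: k) <+: (c :: l) := by
  intro hp
  exact h (List.cons_prefix_cons.mp hp).1

theorem pvRepl_self_prefix (a : Char) (k' v t : List Char) :
    pvRepl (a :: k') v ((a :: k') ++ t) = v ++ pvRepl (a :: k') v t := by
  rw [List.cons_append, pvRepl_pos _ _ _ _ (by
    rw [← List.cons_append]
    exact List.isPrefixOf_iff_prefix.mpr (List.prefix_append _ _))]
  congr 1
  simp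

theorem pvRepl_append_clean (k' v u x : List Char)
    (hu : ∀ c ∈ u, c ≠ '\\') :
    pvRepl ('\\' :: k') v (u ++ x) = u ++ pvRepl ('\\' :: k') v x := by
  induction u with
  | nil => rfl
  | cons c u ih =>
    have hn : ¬ ('\\' :: k') <+: (c :: (u ++ x)) :=
      pvNotPrefixHead _ _ _ _ (fun he => (hu c (by simp)) he.symm)
    rw [List.cons_append, pvRepl_neg _ _ _ _ hn, ih (fun d hd => hu d (by simp [hd]))]
    rfl

-- a pattern w without backslash and without the replacement's first char is a
-- prefix of the replaced string iff it already was one before the replacement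
theorem pvPrefixReflect (k' v' : List Char) (b : Char) (s : List Char) :
    ∀ w : List Char, '\\' ∉ w → b ∉ w →
      (w <+: pvRepl ('\\' :: k') (b :: v') s ↔ w <+: s) := by
  induction s using pvRepl.induct ('\\' :: k') with
  | case1 =>
    intro w _ _
    rw [pvRepl_nil]
  | case2 c cs hpre ih =>
    intro w hw1 hw2
    rw [pvRepl_pos _ _ _ _ hpre]
    cases w with
    | nil => simp
    | cons a w' =>
      constructor
      · intro hp
        have : a = b := by
          have := List.cons_prefix_cons.mp (by simpa using hp)
          exact this.1
        exact absurd (this ▸ List.mem_cons_self) hw2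
      · intro hp
        have hc : c = '\\' :=
          ((List.cons_prefix_cons.mp (List.isPrefixOf_iff_prefix.mp hpre)).1).symm
        have ha : a = c := (List.cons_prefix_cons.mp hp).1
        exact absurd ((ha.trans hc) ▸ List.mem_cons_self) hw1
  | case3 c cs hpre ih =>
    intro w hw1 hw2
    have hnp : ¬ ('\\' :: k') <+: (c :: cs) := by
      intro h; exact hpre (List.isPrefixOf_iff_prefix.mpr h)
    rw [pvRepl_neg _ _ _ _ hnp]
    cases w with
    | nil => simp
    | cons a w' =>
      rw [List.cons_prefix_cons, List.cons_prefix_cons,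
        ih w' (fun h => hw1 (by simp [h])) (fun h => hw2 (by simp [h]))]

theorem pvRepl_go_spec (k v : List Char) (hk : k ≠ []) :
    ∀ (fuel : Nat) (l acc : List Char), l.length ≤ fuel →
      PySem.Chars.replace.go k v fuel l acc = acc.reverse ++ pvRepl k v l := by
  intro fuel
  induction fuel with
  | zero =>
    intro l acc h
    have hl : l = [] := by
      cases l with
      | nil => rfl
      | cons c t => simp at h
    subst hl
    rw [PySem.Chars.replace.go.eq_def, pvRepl_nil]
  | succ f ih =>
    intro l acc h
    cases l with
    | nil =>
      rw [PySem.Chars.replace.go.eq_def, pvRepl_nil]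
      simp
    | cons c t =>
      by_cases hp : k.isPrefixOf (c :: t) = true
      · rw [PySem.Chars.replace.go.eq_def]
        simp only [hp, if_true]
        rw [pvRepl_pos _ _ _ _ hp]
        obtain ⟨a, k', rfl⟩ : ∃ a k', k = a :: k' := by
          cases k with
          | nil => exact absurd rfl hk
          | cons a k' => exact ⟨a, k', rfl⟩
        have hdrop : List.drop (a :: k').length (c :: t) = List.drop ((a :: k').length - 1) t := by
          simp
        have hle : (List.drop ((a :: k').length - 1) t).length ≤ f := by
          simp only [List.length_drop]
          simp at h
          omega
        rw [hdrop, ih _ _ hle]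
        simp
      · rw [PySem.Chars.replace.go.eq_def]
        simp only [hp]
        have hle : t.length ≤ f := by simp at h; omega
        rw [pvRepl_neg _ _ _ _ (fun hh => hp (List.isPrefixOf_iff_prefix.mpr hh)),
          ih _ _ hle]
        simp
    
theorem chars_replace_eq (k v s : List Char) (hk : k ≠ []) :
    PySem.Chars.replace s k v = pvRepl k v s := by
  rw [PySem.Chars.replace]
  have he : k.isEmpty = false := by
    cases k with
    | nil => exact absurd rfl hk
    | cons a k' => rfl
  rw [he]
  simp only [Bool.false_eq_true, if_false]
  rw [pvRepl_go_spec k v hk s.length s [] (le_refl _)]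
  simp

-- the split of c :: cs at a matched key
theorem pvSplitOfPrefix (k : List Char) (c : Char) (cs : List Char)
    (h : k.isPrefixOf (c :: cs) = true) :
    c :: cs = k ++ List.drop k.length (c :: cs) :=
  (List.prefix_iff_eq_append.mp (List.isPrefixOf_iff_prefix.mp h)).symm

-- the three arrow/times replacements of A fused into B's first scan
theorem pvMain3 (s : List Char) :
    pvRepl ['\\','t','i','m','e','s',' '] [' ','×',' ']
      (pvRepl ['\\','d','o','w','n','a','r','r','o','w',' '] ['↓',' ']
        (pvRepl ['\\','u','p','a','r','r','o','w',' '] ['↑',' '] s)) = pvScan3 s := by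
  induction s using pvScan3.induct with
  | case1 =>
    rw [pvScan3.eq_def]
    simp [pvRepl_nil]
  | case2 cs hp ih =>
    have hcs : cs = ['u','p','a','r','r','o','w',' '] ++ List.drop 9 ('\\' :: cs) := by
      simpa using pvSplitOfPrefix _ _ _ hp
    rw [pvScan3.eq_def]
    simp only [hp, if_true]
    conv_lhs => rw [hcs]
    rw [← List.cons_append, pvRepl_self_prefix,
      pvRepl_append_clean _ _ ['↑',' '] _ (by simp),
      pvRepl_append_clean _ _ ['↑',' '] _ (by simp), ih]
    rfl
  | case3 cs hp1 hp ih =>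
    have hcs : cs = ['d','o','w','n','a','r','r','o','w',' '] ++ List.drop 11 ('\\' :: cs) := by
      simpa using pvSplitOfPrefix _ _ _ hp
    rw [pvScan3.eq_def]
    simp only [hp1, hp, if_true, Bool.false_eq_true, if_false]
    rw [pvRepl_neg _ _ _ _ (fun hh => hp1 (List.isPrefixOf_iff_prefix.mpr hh))]
    conv_lhs => rw [hcs]
    rw [pvRepl_append_clean _ _ _ _ (by simp), ← List.cons_append, pvRepl_self_prefix,
      pvRepl_append_clean _ _ ['↓',' '] _ (by simp), ih]
    rfl
  | case4 cs hp1 hp2 hp ih =>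
    have hcs : cs = ['t','i','m','e','s',' '] ++ List.drop 7 ('\\' :: cs) := by
      simpa using pvSplitOfPrefix _ _ _ hp
    rw [pvScan3.eq_def]
    simp only [hp1, hp2, hp, if_true, Bool.false_eq_true, if_false]
    rw [pvRepl_neg _ _ _ _ (fun hh => hp1 (List.isPrefixOf_iff_prefix.mpr hh))]
    conv_lhs => rw [hcs]
    rw [pvRepl_append_clean _ _ _ _ (by simp)]
    rw [pvRepl_neg _ _ _ _ (by simp [List.cons_prefix_cons])]
    rw [pvRepl_append_clean _ _ _ _ (by simp)]
    rw [← List.cons_append, pvRepl_self_prefix, ih]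
    rfl
  | case5 cs hp1 hp2 hp3 ih =>
    rw [pvScan3.eq_def]
    simp only [hp1, hp2, hp3, Bool.false_eq_true, if_false, if_true]
    rw [pvRepl_neg _ _ _ _ (fun hh => hp1 (List.isPrefixOf_iff_prefix.mpr hh))]
    rw [pvRepl_neg _ _ _ _ (by
      intro h
      have h2 := (List.cons_prefix_cons.mp h).2
      have hw := (pvPrefixReflect ['u','p','a','r','r','o','w',' '] [' '] '↑' cs
        ['d','o','w','n','a','r','r','o','w',' '] (by simp) (by simp)).mp h2
      exact hp2 (List.isPrefixOf_iff_prefix.mpr (List.cons_prefix_cons.mpr ⟨rfl, hw⟩)))]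
    rw [pvRepl_neg _ _ _ _ (by
      intro h
      have h2 := (List.cons_prefix_cons.mp h).2
      have hw2 := (pvPrefixReflect ['d','o','w','n','a','r','r','o','w',' '] [' '] '↓'
        (pvRepl ['\\','u','p','a','r','r','o','w',' '] ['↑',' '] cs)
        ['t','i','m','e','s',' '] (by simp) (by simp)).mp h2
      have hw1 := (pvPrefixReflect ['u','p','a','r','r','o','w',' '] [' '] '↑' cs
        ['t','i','m','e','s',' '] (by simp) (by simp)).mp hw2
      exact hp3 (List.isPrefixOf_iff_prefix.mpr (List.cons_prefix_cons.mpr ⟨rfl, hw1⟩)))]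
    rw [ih]
  | case6 c cs hc ih =>
    rw [pvScan3.eq_def]
    simp only [hc, if_false]
    rw [pvRepl_neg _ _ _ _ (pvNotPrefixHead '\\' c _ _ (fun h => hc h.symm)),
      pvRepl_neg _ _ _ _ (pvNotPrefixHead '\\' c _ _ (fun h => hc h.symm)),
      pvRepl_neg _ _ _ _ (pvNotPrefixHead '\\' c _ _ (fun h => hc h.symm)), ih]

-- A's last replacement is exactly B's second scan
theorem pvMainMu (s : List Char) :
    pvRepl ['\\','m','u',' '] ['μ'] s = pvScanMu s := by
  induction s using pvScanMu.induct with
  | case1 => rw [pvScanMu.eq_def, pvRepl_nil]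
  | case2 c cs hcond ih =>
    obtain ⟨hc, hp⟩ := hcond
    subst hc
    rw [pvScanMu.eq_def]
    dsimp only
    rw [if_pos ⟨rfl, hp⟩, pvRepl_pos _ _ _ _ hp]
    have hd : List.drop ((['\\','m','u',' '] : List Char).length - 1) cs
        = List.drop 4 ('\\' :: cs) := by simp
    rw [hd, ih]
    rfl
  | case3 c cs hcond ih =>
    have hnp : ¬ (['\\','m','u',' '] : List Char) <+: (c :: cs) := by
      intro h
      have hc : c = '\\' := ((List.cons_prefix_cons.mp h).1).symm
      exact hcond ⟨hc, List.isPrefixOf_iff_prefix.mpr h⟩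
    rw [pvScanMu.eq_def]
    dsimp only
    rw [if_neg hcond, pvRepl_neg _ _ _ _ hnp, ih]

-- ===== VERDICT (by name: the statement is the Claim_ definition above) =====
theorem table_html_clean_spec : Claim_equal_table_html_clean := by
  intro t _
  unfold Spec_table_html_clean table_html_clean table_html_clean_alt
  by_cases h : t = ""
  · simp [h]
  · simp only [h, if_false]
    show PySem.Str.replace _ _ _ = _
    simp only [PySem.Str.replace]
    have e1 : ("\\uparrow " : String).toList = ['\\','u','p','a','r','r','o','w',' '] := rfl
    have e2 : ("\\downarrow " : String).toList = ['\\','d','o','w','n','a','r','r','o','w',' '] := rfl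
    have e3 : ("\\times " : String).toList = ['\\','t','i','m','e','s',' '] := rfl
    have e4 : ("\\mu " : String).toList = ['\\','m','u',' '] := rfl
    have f1 : ("↑ " : String).toList = ['↑',' '] := rfl
    have f2 : ("↓ " : String).toList = ['↓',' '] := rfl
    have f3 : (" × " : String).toList = [' ','×',' '] := rfl
    have f4 : ("μ" : String).toList = ['μ'] := rfl
    rw [e1, e2, e3, e4, f1, f2, f3, f4]
    rw [chars_replace_eq _ _ _ (by simp)]
    simp only [String.toList_ofList]
    rw [chars_replace_eq _ _ _ (by simp)]
    rw [chars_replace_eq _ _ _ (by simp)]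
    rw [chars_replace_eq _ _ _ (by simp)]
    rw [pvMain3, pvMainMu]
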